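-- pv_equiv track=rewrite | github.com/wansang93/Algorithm | This is coding test/test.py | count_three
-- ===== SOURCE A (Python) =====
-- def count_three(n):
--    count = 0
--    for i in range(n+1):
--       for j in range(60):
--          for k in range(60):
--             if '3' in str(i) + str(j) + str(k):
--                count += 1
--
--    return count
-- ===== SOURCE B (Python) =====
-- def _has_digit_three(i):
--     # arithmetic digit scan: does the decimal representation of i (i >= 0) contain a 3?
--     while i > 0:
--         if i % 10 == 3:
--             return True
--         i //= 10
--     return False
--
-- def count_three(n):
--     # For each i, the inner 60x60 double loop of the original contributes
--     #   3600 pairs if '3' occurs in str(i)  (every pair matches), and otherwise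
--     #   1575 pairs (= 3600 - 45*45: 45 of the numbers 0..59 avoid the digit 3,
--     #   so 45*45 pairs (j, k) have no '3' at all).
--     total = 0
--     for i in range(n + 1):
--         total += 3600 if _has_digit_three(i) else 1575
--     return total
-- ===== Notes on version B (the rewrite author's own statement) =====
-- stated objective: faster
-- what changed: Replaces the 60x60 inner double loop and the string concatenations by a precomputed pair count (3600 matching pairs when i contains a 3, else 1575) and an arithmetic digit scan of i, leaving a single loop over i.
import Mathlib
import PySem

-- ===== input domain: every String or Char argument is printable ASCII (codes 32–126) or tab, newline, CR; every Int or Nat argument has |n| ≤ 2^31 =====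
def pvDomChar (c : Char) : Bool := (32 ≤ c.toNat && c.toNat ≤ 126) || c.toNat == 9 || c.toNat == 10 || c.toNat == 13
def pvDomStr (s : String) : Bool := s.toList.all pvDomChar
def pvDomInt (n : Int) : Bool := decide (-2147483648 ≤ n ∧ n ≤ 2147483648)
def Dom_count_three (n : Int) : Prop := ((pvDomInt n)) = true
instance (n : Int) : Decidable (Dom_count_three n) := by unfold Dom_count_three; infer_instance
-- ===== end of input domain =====

-- B replaces the 60x60 inner string-building loops by a precomputed pair count
-- (3600 when the decimal digits of i contain a 3, else 1575) and an arithmetic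
-- digit scan of i, leaving one loop over i (objective: faster, constant factor).

-- ===== PORT A =====
-- strings are ported as their character lists ('str(i)+str(j)+str(k)' = list append,
-- ''3' in s' = PySem.Chars.isIn ['3']; exact on this all-ASCII data)
def count_three (n : Int) : Int :=
  (PySem.List.pyRange 0 (n + 1) 1).foldl (fun count i =>
    (PySem.List.pyRange 0 60 1).foldl (fun count j =>
      (PySem.List.pyRange 0 60 1).foldl (fun count k =>
        if PySem.Chars.isIn ['3']
            (PySem.Int.toChars i ++ PySem.Int.toChars j ++ PySem.Int.toChars k)
        then count + 1 else count) count) count) 0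

-- ===== PORT B =====
-- port of _has_digit_three's while loop (i //= 10 until i == 0 or a digit 3 is seen)
def hasDigitThree (i : Int) : Bool :=
  if 0 < i then
    if PySem.Int.mod i 10 = 3 then true
    else hasDigitThree (PySem.Int.floordiv i 10)
  else false
termination_by i.toNat
decreasing_by
  rw [PySem.Int.floordiv_eq_ediv_of_pos (by norm_num)]
  omega

def count_three_alt (n : Int) : Int :=
  (PySem.List.pyRange 0 (n + 1) 1).foldl
    (fun total i => total + if hasDigitThree i then 3600 else 1575) 0

-- ===== PRECONDITION & SPEC =====
def Spec_count_three (n : Int) (out : Int) : Prop := out = count_three_alt n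
instance (n : Int) (out : Int) : Decidable (Spec_count_three n out) := by unfold Spec_count_three; infer_instance

-- ===== CLAIM (what is proved, stated in full; the proofs are below) =====
def Claim_equal_count_three : Prop := ∀ (n : Int), Dom_count_three n → Spec_count_three n (count_three n)

-- ===== LEMMAS AND PROOFS =====

-- proof-side digit scan on Nat, mirroring hasDigitThree
def hasDigit3Nat (n : Nat) : Bool :=
  if h : n = 0 then false
  else if n % 10 = 3 then true
  else hasDigit3Nat (n / 10)
termination_by n
decreasing_by omega

lemma hasDigitThree_natCast (m : Nat) : hasDigitThree (m : Int) = hasDigit3Nat m := by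
  induction m using Nat.strong_induction_on with
  | _ m ih =>
    unfold hasDigitThree hasDigit3Nat
    by_cases h0 : m = 0
    · simp [h0]
    · have hpos : (0 : Int) < (m : Int) := by exact_mod_cast Nat.pos_of_ne_zero h0
      have hmod : PySem.Int.mod (m : Int) 10 = ((m % 10 : Nat) : Int) := by
        rw [PySem.Int.mod_eq_emod_of_pos (by norm_num)]
        omega
      have hdiv : PySem.Int.floordiv (m : Int) 10 = ((m / 10 : Nat) : Int) := by
        rw [PySem.Int.floordiv_eq_ediv_of_pos (by norm_num)]
        omega
      rw [if_pos hpos, dif_neg h0, hmod, hdiv, ih (m / 10) (by omega)]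
      by_cases h3 : m % 10 = 3
      · rw [if_pos (show ((m % 10 : Nat) : Int) = 3 by exact_mod_cast h3), if_pos h3]
      · rw [if_neg (show ¬ ((m % 10 : Nat) : Int) = 3 by exact_mod_cast h3), if_neg h3]

lemma digitChar_eq_three {d : Nat} (hd : d < 10) : (d.digitChar = '3') ↔ d = 3 := by
  interval_cases d <;> simp [Nat.digitChar]

lemma mem_toDigitsCore (f : Nat) : ∀ (n : Nat) (l : List Char), n < 10 ^ f →
    ('3' ∈ Nat.toDigitsCore 10 f n l ↔ '3' ∈ l ∨ hasDigit3Nat n = true) := by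
  induction f with
  | zero =>
    intro n l hn
    rw [pow_zero] at hn
    have h0 : n = 0 := by omega
    subst h0
    rw [show hasDigit3Nat 0 = false from by rw [hasDigit3Nat]; simp]
    simp [Nat.toDigitsCore]
  | succ f ih =>
    intro n l hn
    rw [show Nat.toDigitsCore 10 (f + 1) n l =
        (if n / 10 = 0 then (n % 10).digitChar :: l
         else Nat.toDigitsCore 10 f (n / 10) ((n % 10).digitChar :: l)) from rfl]
    have hd : ((n % 10).digitChar = '3') ↔ n % 10 = 3 := digitChar_eq_three (by omega)
    have hd' : ('3' = (n % 10).digitChar) ↔ n % 10 = 3 := by rw [eq_comm]; exact hd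
    by_cases hq : n / 10 = 0
    · rw [if_pos hq]
      have hrec : hasDigit3Nat n = (if n % 10 = 3 then true else false) := by
        by_cases h0 : n = 0
        · subst h0
          rw [hasDigit3Nat]
          norm_num
        · rw [hasDigit3Nat, dif_neg h0, hq, show hasDigit3Nat 0 = false from by rw [hasDigit3Nat]; simp]
      simp only [List.mem_cons, hrec, hd']
      by_cases h3 : n % 10 = 3 <;> simp [h3]
    · rw [if_neg hq]
      have h0 : n ≠ 0 := by omega
      have hdivlt : n / 10 < 10 ^ f := by
        rw [Nat.div_lt_iff_lt_mul (show 0 < 10 by norm_num)]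
        calc n < 10 ^ (f + 1) := hn
        _ = 10 ^ f * 10 := by ring
      rw [ih (n / 10) _ hdivlt]
      have hrec : hasDigit3Nat n = (if n % 10 = 3 then true else hasDigit3Nat (n / 10)) := by
        rw [hasDigit3Nat, dif_neg h0]
      simp only [List.mem_cons, hrec, hd']
      by_cases h3 : n % 10 = 3 <;> simp [h3]

lemma singleton_infix_iff (a : Char) (l : List Char) : [a] <:+: l ↔ a ∈ l := by
  constructor
  · intro h; exact h.mem (List.mem_singleton_self a)
  · intro h; obtain ⟨s, t, rfl⟩ := List.mem_iff_append.mp h; exact ⟨s, t, by simp⟩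

lemma isIn_three_iff (s : List Char) : PySem.Chars.isIn ['3'] s = true ↔ '3' ∈ s := by
  rw [PySem.Chars.isIn_iff_infix, singleton_infix_iff]

lemma mem_toChars_iff (i : Int) (hi : 0 ≤ i) :
    ('3' ∈ PySem.Int.toChars i) ↔ hasDigitThree i = true := by
  have hnn : ¬ i < 0 := by omega
  rw [show PySem.Int.toChars i = Nat.toDigits 10 i.toNat by
    simp [PySem.Int.toChars, hnn]]
  have hfuel : i.toNat < 10 ^ (i.toNat + 1) :=
    Nat.lt_trans (Nat.lt_pow_self (by norm_num))
      (Nat.pow_lt_pow_right (by norm_num) (Nat.lt_succ_self _))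
  rw [show Nat.toDigits 10 i.toNat = Nat.toDigitsCore 10 (i.toNat + 1) i.toNat [] from rfl]
  rw [mem_toDigitsCore _ _ _ hfuel]
  have heq : hasDigitThree i = hasDigit3Nat i.toNat := by
    have h := hasDigitThree_natCast i.toNat
    rwa [Int.toNat_of_nonneg hi] at h
  simp [heq]

set_option maxHeartbeats 2000000 in
lemma inner_eq (i count : Int) (hi : 0 ≤ i) :
    (PySem.List.pyRange 0 60 1).foldl (fun c j =>
      (PySem.List.pyRange 0 60 1).foldl (fun c k =>
        if PySem.Chars.isIn ['3']
            (PySem.Int.toChars i ++ PySem.Int.toChars j ++ PySem.Int.toChars k)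
        then c + 1 else c) c) count
    = count + (if hasDigitThree i then 3600 else 1575) := by
  simp only [PySem.List.foldl_count_if, PySem.List.foldl_add]
  by_cases h3 : hasDigitThree i = true
  · rw [if_pos h3]
    rw [List.map_congr_left (fun j _ => by
      rw [List.countP_eq_length.mpr (fun k _ => by
        rw [isIn_three_iff]
        simp only [List.mem_append]
        exact Or.inl (Or.inl ((mem_toChars_iff i hi).mpr h3)))]
      : ∀ j ∈ PySem.List.pyRange 0 60 1,
        ((List.countP (fun k => PySem.Chars.isIn ['3']
            (PySem.Int.toChars i ++ PySem.Int.toChars j ++ PySem.Int.toChars k))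
          (PySem.List.pyRange 0 60 1) : Nat) : Int)
        = (((PySem.List.pyRange 0 60 1).length : Nat) : Int))]
    rw [PySem.List.sum_map_const_int, PySem.List.length_pyRange_one]
    norm_num
  · rw [if_neg h3]
    have hnot : '3' ∉ PySem.Int.toChars i := fun hm => h3 ((mem_toChars_iff i hi).mp hm)
    rw [List.map_congr_left (fun j _ => by
      rw [List.countP_congr (fun k _ => by
        simp only [isIn_three_iff, List.mem_append]
        tauto : ∀ k ∈ PySem.List.pyRange 0 60 1,
          (PySem.Chars.isIn ['3']
            (PySem.Int.toChars i ++ PySem.Int.toChars j ++ PySem.Int.toChars k) = true)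
          ↔ (PySem.Chars.isIn ['3'] (PySem.Int.toChars j ++ PySem.Int.toChars k) = true))]
      : ∀ j ∈ PySem.List.pyRange 0 60 1,
        ((List.countP (fun k => PySem.Chars.isIn ['3']
            (PySem.Int.toChars i ++ PySem.Int.toChars j ++ PySem.Int.toChars k))
          (PySem.List.pyRange 0 60 1) : Nat) : Int)
        = ((List.countP (fun k => PySem.Chars.isIn ['3']
            (PySem.Int.toChars j ++ PySem.Int.toChars k))
          (PySem.List.pyRange 0 60 1) : Nat) : Int))]
    congr 1

-- ===== VERDICT (by name: the statement is the Claim_ definition above) =====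
theorem count_three_spec : Claim_equal_count_three := by
  intro n _
  unfold Spec_count_three count_three count_three_alt
  apply PySem.List.foldl_congr_mem
  intro acc i hi
  have h0 : 0 ≤ i := (PySem.List.mem_pyRange_one.mp hi).1
  exact inner_eq i acc h0
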